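-- pv_equiv track=rewrite | github.com/Nama21yo/Natnael_CP | cses_concrete_tickets.py | solve
-- ===== SOURCE A (Python) =====
-- import bisect
--
-- def solve(price,pay,n,m):
--     # Create a multiset to store the prices of all tickets
--     maxPrice = sorted(price)
--
--     # Create an array answer to store the answer for each customer
--     ans = [0 for j in range(len(pay))]
--
--     # Now iterate through every customer
--     for i in range(len(pay)):
--
--         temp = pay[i]
--
--         # Find the upper bound of maximum price offered by customer in the multiset
--         itr = bisect.bisect(maxPrice,temp)
--
--         # If it points to the beginning, that means no ticket is available for the customer
--         # Otherwise, decrement the iterator and get the value out of it and then erase that value from the multiset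
--         if (itr == 0):
--             ans[i] = -1
--         else:
--             itr -= 1
--             ans[i] = maxPrice[itr]
--             maxPrice.remove(ans[i])
--
--     # Return the array answer
--     return ans
-- ===== SOURCE B (Python) =====
-- def solve(price, pay, n, m):
--     # one pass per customer over the unsorted pool: pick the max affordable
--     # ticket directly, no sorting and no binary search
--     remaining = list(price)
--     ans = []
--     for temp in pay:
--         best = max([v for v in remaining if v <= temp], default=None)
--         if best is None:
--             ans.append(-1)
--         else:
--             ans.append(best)
--             remaining.remove(best)
--     return ans
-- ===== Notes on version B (the rewrite author's own statement) =====
-- stated objective: simpler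
-- what changed: B drops the sort and the bisect entirely: it keeps the ticket pool unsorted and, for each customer, takes the maximum affordable ticket by a direct max over a filtered scan, appending answers instead of preallocating and indexing.
import Mathlib
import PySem

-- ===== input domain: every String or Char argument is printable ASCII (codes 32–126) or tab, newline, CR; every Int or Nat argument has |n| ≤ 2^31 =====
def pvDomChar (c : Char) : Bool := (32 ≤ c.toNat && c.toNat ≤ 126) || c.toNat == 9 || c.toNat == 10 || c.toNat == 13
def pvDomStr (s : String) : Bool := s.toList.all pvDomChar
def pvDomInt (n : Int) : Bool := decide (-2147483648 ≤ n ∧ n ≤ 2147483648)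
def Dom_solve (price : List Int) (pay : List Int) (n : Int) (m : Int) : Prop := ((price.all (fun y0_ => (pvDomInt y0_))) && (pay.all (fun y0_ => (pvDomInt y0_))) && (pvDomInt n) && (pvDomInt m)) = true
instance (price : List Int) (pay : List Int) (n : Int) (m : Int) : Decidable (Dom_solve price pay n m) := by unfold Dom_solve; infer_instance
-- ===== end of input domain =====

-- B drops A's sort+bisect: it scans the unsorted pool for the max affordable ticket per customer
-- and appends answers instead of preallocating an index-assigned array (objective: simpler).


-- ===== PORT A =====
-- the body of A's 'for i in range(len(pay))' loop, named for the proofs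
def aStep (pay : List Int) (st : List Int × List Int) (i : Nat) : List Int × List Int :=
  let temp := PySem.List.pyGetD pay (i : Int) 0
  let itr := PySem.List.bisectRight st.1 temp
  if itr = 0 then
    (st.1, PySem.List.pySetD st.2 (i : Int) (-1))
  else
    let v := PySem.List.pyGetD st.1 ((itr - 1 : Nat) : Int) 0
    ((PySem.List.remove? st.1 v).getD st.1, PySem.List.pySetD st.2 (i : Int) v)

def solve (price : List Int) (pay : List Int) (n : Int) (m : Int) : List Int :=
  let maxPrice := PySem.List.sorted price (fun v => v) false
  let ans : List Int := (List.range pay.length).map (fun _ => (0 : Int))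
  ((List.range pay.length).foldl (aStep pay) (maxPrice, ans)).2

-- ===== PORT B =====
-- the body of B's 'for temp in pay' loop, named for the proofs
def bStep (st : List Int × List Int) (temp : Int) : List Int × List Int :=
  match PySem.List.max? (st.1.filter (fun v => decide (v ≤ temp))) (fun v => v) with
  | none => (st.1, st.2 ++ [(-1 : Int)])
  | some best => ((PySem.List.remove? st.1 best).getD st.1, st.2 ++ [best])

def solve_alt (price : List Int) (pay : List Int) (n : Int) (m : Int) : List Int :=
  (pay.foldl bStep (price, ([] : List Int))).2

-- ===== PRECONDITION & SPEC =====
def Spec_solve (price : List Int) (pay : List Int) (n : Int) (m : Int) (out : List Int) : Prop := out = solve_alt price pay n m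
instance (price : List Int) (pay : List Int) (n : Int) (m : Int) (out : List Int) : Decidable (Spec_solve price pay n m out) := by unfold Spec_solve; infer_instance

-- ===== CLAIM (what is proved, stated in full; the proofs are below) =====
def Claim_equal_solve : Prop := ∀ (price : List Int) (pay : List Int) (n : Int) (m : Int), Dom_solve price pay n m → Spec_solve price pay n m (solve price pay n m)

-- ===== LEMMAS AND PROOFS =====

-- A's loop, restated as structural recursion on the customer list (proof helper)
def aRun : List Int → List Int → List Int
  | [], _ => []
  | t :: rest, mp =>
    let itr := PySem.List.bisectRight mp t
    if itr = 0 then (-1) :: aRun rest mp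
    else
      let v := PySem.List.pyGetD mp ((itr - 1 : Nat) : Int) 0
      v :: aRun rest ((PySem.List.remove? mp v).getD mp)

-- B's loop, restated as structural recursion on the customer list (proof helper)
def bRun : List Int → List Int → List Int
  | [], _ => []
  | t :: rest, rem =>
    match PySem.List.max? (rem.filter (fun v => decide (v ≤ t))) (fun v => v) with
    | none => (-1) :: bRun rest rem
    | some best => best :: bRun rest ((PySem.List.remove? rem best).getD rem)

lemma set_take_succ (xs : List Int) (k : Nat) (v : Int) (h : k < xs.length) :
    (xs.set k v).take (k + 1) = xs.take k ++ [v] := by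
  rw [List.take_add_one, List.take_set]
  congr 1
  · exact List.set_eq_of_length_le (by simp)
  · rw [List.getElem?_set_self h, Option.toList_some]

lemma A_loop (all : List Int) : ∀ (rest pref : List Int) (mp ans0 : List Int),
    all = pref ++ rest → ans0.length = all.length →
    ((List.range' pref.length rest.length).foldl (aStep all) (mp, ans0)).2
      = ans0.take pref.length ++ aRun rest mp := by
  intro rest
  induction rest with
  | nil =>
    intro pref mp ans0 hall hlen
    subst hall
    simp only [aRun]
    rw [List.take_of_length_le (by simp at hlen; omega)]
    simp
  | cons t rest ih =>
    intro pref mp ans0 hall hlen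
    have hk : pref.length < ans0.length := by
      subst hall; simp at hlen ⊢; omega
    have htemp : PySem.List.pyGetD all ((pref.length : Nat) : Int) 0 = t := by
      subst hall
      rw [PySem.List.pyGetD_natCast, List.getD_eq_getElem?_getD,
          List.getElem?_append_right (le_refl _)]
      simp
    simp only [List.length_cons]
    rw [List.range'_succ, List.foldl_cons]
    by_cases h0 : PySem.List.bisectRight mp t = 0
    · have hstep : aStep all (mp, ans0) pref.length
          = (mp, ans0.set pref.length (-1)) := by
        unfold aStep
        simp only [htemp, h0, if_true, PySem.List.pySetD_natCast]
      rw [hstep]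
      have := ih (pref ++ [t]) mp (ans0.set pref.length (-1))
        (by simpa using hall) (by simpa using hlen)
      simp only [List.length_append, List.length_cons, List.length_nil, Nat.zero_add] at this
      rw [this, set_take_succ ans0 pref.length (-1) hk]
      simp only [aRun, h0, if_true, List.append_assoc, List.singleton_append]
    · have hstep : aStep all (mp, ans0) pref.length
          = ((PySem.List.remove? mp (PySem.List.pyGetD mp ((PySem.List.bisectRight mp t - 1 : Nat) : Int) 0)).getD mp,
             ans0.set pref.length (PySem.List.pyGetD mp ((PySem.List.bisectRight mp t - 1 : Nat) : Int) 0)) := by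
        unfold aStep
        rw [htemp, if_neg h0]
        simp only [PySem.List.pySetD_natCast]
      rw [hstep]
      have := ih (pref ++ [t])
        ((PySem.List.remove? mp (PySem.List.pyGetD mp ((PySem.List.bisectRight mp t - 1 : Nat) : Int) 0)).getD mp)
        (ans0.set pref.length (PySem.List.pyGetD mp ((PySem.List.bisectRight mp t - 1 : Nat) : Int) 0))
        (by simpa using hall) (by simpa using hlen)
      simp only [List.length_append, List.length_cons, List.length_nil, Nat.zero_add] at this
      rw [this, set_take_succ ans0 pref.length _ hk]
      simp only [aRun, List.append_assoc, List.singleton_append]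
      rw [if_neg h0]

lemma B_loop : ∀ (pays rem acc : List Int),
    (pays.foldl bStep (rem, acc)).2 = acc ++ bRun pays rem := by
  intro pays
  induction pays with
  | nil => intro rem acc; simp [bRun]
  | cons t rest ih =>
    intro rem acc
    rw [List.foldl_cons]
    cases hmax : PySem.List.max? (rem.filter (fun v => decide (v ≤ t))) (fun v => v) with
    | none =>
      rw [show bStep (rem, acc) t = (rem, acc ++ [(-1 : Int)]) by
        unfold bStep; rw [hmax]]
      rw [ih]
      simp only [bRun, hmax, List.append_assoc, List.singleton_append]
    | some best =>
      rw [show bStep (rem, acc) t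
          = ((PySem.List.remove? rem best).getD rem, acc ++ [best]) by
        unfold bStep; rw [hmax]]
      rw [ih]
      simp only [bRun, hmax, List.append_assoc, List.singleton_append]

lemma runs_agree : ∀ (pays mp rem : List Int),
    mp.Pairwise (· ≤ ·) → mp.Perm rem → aRun pays mp = bRun pays rem := by
  intro pays
  induction pays with
  | nil => intro mp rem _ _; simp [aRun, bRun]
  | cons t rest ih =>
    intro mp rem hsorted hperm
    have hspec := PySem.List.bisectRight_spec mp t hsorted
    by_cases h0 : PySem.List.bisectRight mp t = 0
    · -- no affordable ticket on either side
      have hfilt : rem.filter (fun v => decide (v ≤ t)) = [] := by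
        rw [List.filter_eq_nil_iff]
        intro x hx
        have hxmp : x ∈ mp := hperm.mem_iff.mpr hx
        obtain ⟨j, hj, hje⟩ := List.getElem_of_mem hxmp
        have := hspec.2.2 j hj (by omega)
        simp only [decide_eq_true_eq]
        omega
      simp only [aRun, bRun, h0, if_true, hfilt]
      rw [show PySem.List.max? ([] : List Int) (fun v => v) = none from
        (PySem.List.max?_eq_none_iff ([] : List Int) (fun v => v)).mpr rfl]
      exact congrArg _ (ih mp rem hsorted hperm)
    · -- the chosen values coincide
      have hlt : PySem.List.bisectRight mp t - 1 < mp.length := by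
        have := hspec.1; omega
      have hv : PySem.List.pyGetD mp (((PySem.List.bisectRight mp t - 1 : Nat) : Int)) 0
          = mp[PySem.List.bisectRight mp t - 1] := by
        rw [PySem.List.pyGetD_natCast, List.getD_eq_getElem?_getD, List.getElem?_eq_getElem hlt]
        rfl
      have hvle : mp[PySem.List.bisectRight mp t - 1] ≤ t :=
        hspec.2.1 _ hlt (by omega)
      have hvmem : mp[PySem.List.bisectRight mp t - 1] ∈ mp := List.getElem_mem hlt
      have hvrem : mp[PySem.List.bisectRight mp t - 1] ∈ rem := hperm.mem_iff.mp hvmem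
      have hvfilt : mp[PySem.List.bisectRight mp t - 1] ∈ rem.filter (fun x => decide (x ≤ t)) := by
        rw [List.mem_filter]
        exact ⟨hvrem, by simpa using hvle⟩
      cases hmax : PySem.List.max? (rem.filter (fun x => decide (x ≤ t))) (fun x => x) with
      | none =>
        rw [PySem.List.max?_eq_none_iff] at hmax
        rw [hmax] at hvfilt; simp at hvfilt
      | some best =>
        have hbmem := PySem.List.max?_mem hmax
        have hble : best ≤ t := by simpa using (List.mem_filter.mp hbmem).2
        have hbrem : best ∈ rem := (List.mem_filter.mp hbmem).1
        have hbmp : best ∈ mp := hperm.mem_iff.mpr hbrem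
        have hvb : mp[PySem.List.bisectRight mp t - 1] ≤ best :=
          PySem.List.max?_isMax hmax _ hvfilt
        have hbv : best ≤ mp[PySem.List.bisectRight mp t - 1] := by
          obtain ⟨j, hj, hje⟩ := List.getElem_of_mem hbmp
          have hjlt : j < PySem.List.bisectRight mp t := by
            by_contra hge
            have := hspec.2.2 j hj (by omega)
            omega
          rcases Nat.lt_or_ge j (PySem.List.bisectRight mp t - 1) with hcase | hcase
          · have := List.pairwise_iff_getElem.mp hsorted j (PySem.List.bisectRight mp t - 1) hj hlt hcase
            rw [hje] at this; exact this
          · have : j = PySem.List.bisectRight mp t - 1 := by omega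
            subst this; rw [hje]
        have hbeq : best = mp[PySem.List.bisectRight mp t - 1] := le_antisymm hbv hvb
        simp only [aRun, bRun, hmax, hv, hbeq]
        rw [if_neg h0]
        congr 1
        rw [PySem.List.remove?_eq_some_erase mp _ hvmem,
            PySem.List.remove?_eq_some_erase rem _ hvrem]
        simp only [Option.getD_some]
        exact ih (mp.erase _) (rem.erase _)
          (hsorted.sublist List.erase_sublist) (hperm.erase _)

-- ===== VERDICT (by name: the statement is the Claim_ definition above) =====
theorem solve_spec : Claim_equal_solve := by
  intro price pay n m _
  unfold Spec_solve solve solve_alt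
  rw [List.range_eq_range']
  dsimp only
  have hA := A_loop pay pay [] (PySem.List.sorted price (fun v => v) false)
    ((List.range' 0 pay.length).map (fun _ => (0 : Int))) (by simp) (by simp)
  simp only [List.length_nil, List.take_zero, List.nil_append] at hA
  rw [hA, B_loop pay price [], List.nil_append]
  exact runs_agree pay (PySem.List.sorted price (fun v => v) false) price
    (by simpa using PySem.List.sorted_pairwise price (fun v => v))
    (PySem.List.sorted_perm price (fun v => v) false)
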